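-- pv_equiv track=rewrite | github.com/WeiqiNs/CubeCrypto | src/encbit/face.py | get_frame_index
-- ===== SOURCE A (Python) =====
-- import math
-- from collections import deque
--
-- def get_frame_index(cube_side_length: int) -> list:
--     """Get index names for the cube face data frame.
--
--     :param cube_side_length: The desired side length of the cube.
--     :return: A list object with the index names.
--     """
--     # If the side length is even, start with an empty queue.
--     if cube_side_length % 2 == 0:
--         index_queue = deque()
--         # Pad D on the right side and T on the left side.
--         for move_index in range(1, int(cube_side_length / 2) + 1):
--             index_queue.appendleft(f"T{move_index}")
--             index_queue.append(f"D{move_index}")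
--
--     # If side length is odd, start the queue with a "C" at the center.
--     else:
--         index_queue = deque("C")
--         # Pad D on the right side and T on the left side.
--         for move_index in range(1, int(math.ceil(cube_side_length / 2))):
--             index_queue.appendleft(f"T{move_index}")
--             index_queue.append(f"D{move_index}")
--
--     return list(index_queue)
-- ===== SOURCE B (Python) =====
-- def get_frame_index(cube_side_length: int) -> list:
--     """Get index names for the cube face data frame.
--
--     :param cube_side_length: The desired side length of the cube.
--     :return: A list object with the index names.
--     """
--     m = cube_side_length // 2
--     tops = [f"T{i}" for i in range(m, 0, -1)]
--     downs = [f"D{i}" for i in range(1, m + 1)]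
--     middle = ["C"] if cube_side_length % 2 else []
--     return tops + middle + downs
-- ===== Notes on version B (the rewrite author's own statement) =====
-- stated objective: simpler
-- what changed: Replaces the center-out deque-growing loop (appendleft/append each iteration) with two independent range comprehensions (T-names counting down, D-names counting up) concatenated around an optional center element, eliminating the deque and the loop state entirely.
import Mathlib
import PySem

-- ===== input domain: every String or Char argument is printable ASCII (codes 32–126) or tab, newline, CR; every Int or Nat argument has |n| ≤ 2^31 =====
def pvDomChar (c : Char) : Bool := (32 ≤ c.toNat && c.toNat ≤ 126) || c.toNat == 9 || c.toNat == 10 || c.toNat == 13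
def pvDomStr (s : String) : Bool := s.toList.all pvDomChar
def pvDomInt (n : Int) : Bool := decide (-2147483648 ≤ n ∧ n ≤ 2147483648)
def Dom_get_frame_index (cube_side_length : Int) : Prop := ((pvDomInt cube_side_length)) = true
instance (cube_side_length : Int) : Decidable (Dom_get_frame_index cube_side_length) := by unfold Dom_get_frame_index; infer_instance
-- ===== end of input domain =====

-- B replaces A's center-out deque-growing loop with two independent range maps
-- concatenated around an optional center element (simpler decomposition; same O(n) cost).


-- ===== PORT A =====
-- A's deque is modelled as a List String: appendleft = cons at the head, append = ++ [·].
-- int(cube_side_length / 2) is exact truncating division for |n| ≤ 2^31 (n/2 is an exact float):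
-- ported as PySem.Int.truncdiv.  math.ceil(n / 2) for odd n equals n // 2 + 1 (exact float again):
-- ported as PySem.Int.floordiv n 2 + 1.
def get_frame_index (cube_side_length : Int) : List String :=
  if PySem.Int.mod cube_side_length 2 = 0 then
    (PySem.List.pyRange 1 (PySem.Int.truncdiv cube_side_length 2 + 1) 1).foldl
      (fun q i => ("T" ++ PySem.Int.toStr i) :: (q ++ ["D" ++ PySem.Int.toStr i])) []
  else
    (PySem.List.pyRange 1 (PySem.Int.floordiv cube_side_length 2 + 1) 1).foldl
      (fun q i => ("T" ++ PySem.Int.toStr i) :: (q ++ ["D" ++ PySem.Int.toStr i])) ["C"]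

-- ===== PORT B =====
def get_frame_index_alt (cube_side_length : Int) : List String :=
  let m := PySem.Int.floordiv cube_side_length 2
  let tops := (PySem.List.pyRange m 0 (-1)).map (fun i => "T" ++ PySem.Int.toStr i)
  let downs := (PySem.List.pyRange 1 (m + 1) 1).map (fun i => "D" ++ PySem.Int.toStr i)
  let middle := if PySem.Int.mod cube_side_length 2 ≠ 0 then ["C"] else []
  tops ++ middle ++ downs

-- ===== PRECONDITION & SPEC =====
def Spec_get_frame_index (cube_side_length : Int) (out : List String) : Prop := out = get_frame_index_alt cube_side_length
instance (cube_side_length : Int) (out : List String) : Decidable (Spec_get_frame_index cube_side_length out) := by unfold Spec_get_frame_index; infer_instance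

-- ===== CLAIM (what is proved, stated in full; the proofs are below) =====
def Claim_equal_get_frame_index : Prop := ∀ (cube_side_length : Int), Dom_get_frame_index cube_side_length → Spec_get_frame_index cube_side_length (get_frame_index cube_side_length)

-- ===== LEMMAS AND PROOFS =====

-- A's loop over range(1, m+1) with initial deque `mid` produces exactly
-- [T m, …, T 1] ++ mid ++ [D 1, …, D m].
theorem frame_loop_eq (m : Int) (hm : 0 ≤ m) (mid : List String) :
    (PySem.List.pyRange 1 (m + 1) 1).foldl
      (fun q i => ("T" ++ PySem.Int.toStr i) :: (q ++ ["D" ++ PySem.Int.toStr i])) mid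
    = (PySem.List.pyRange m 0 (-1)).map (fun i => "T" ++ PySem.Int.toStr i)
      ++ mid
      ++ (PySem.List.pyRange 1 (m + 1) 1).map (fun i => "D" ++ PySem.Int.toStr i) := by
  induction m, hm using Int.le_induction with
  | base =>
      rw [PySem.List.pyRange_one_eq_nil (by omega : (0:Int) + 1 ≤ 1),
          PySem.List.pyRange_neg_one_eq_nil (le_refl (0:Int))]
      simp
  | succ m hm ih =>
      rw [PySem.List.pyRange_one_succ_right (by omega : (1:Int) ≤ m + 1),
          PySem.List.pyRange_neg_one_cons (by omega : (0:Int) < m + 1)]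
      simp only [List.foldl_append, List.foldl_cons, List.foldl_nil, ih, List.map_cons]
      simp

-- For even n with |n| ≤ 2^31, int(n/2) equals n // 2.
theorem truncdiv_eq_floordiv_of_even (n : Int) (h : PySem.Int.mod n 2 = 0) :
    PySem.Int.truncdiv n 2 = PySem.Int.floordiv n 2 := by
  have h2 : (2:Int) ∣ n := (PySem.Int.mod_eq_zero_iff_dvd n 2).mp h
  obtain ⟨k, rfl⟩ := h2
  simp [PySem.Int.truncdiv, PySem.Int.floordiv]

-- ===== VERDICT (by name: the statement is the Claim_ definition above) =====
theorem get_frame_index_spec : Claim_equal_get_frame_index := by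
  intro n _
  simp only [Spec_get_frame_index, get_frame_index, get_frame_index_alt]
  by_cases he : PySem.Int.mod n 2 = 0
  · rw [if_pos he, truncdiv_eq_floordiv_of_even n he, if_neg (not_not_intro he)]
    by_cases h : 0 ≤ PySem.Int.floordiv n 2
    · rw [frame_loop_eq _ h []]
    · rw [PySem.List.pyRange_one_eq_nil (by omega),
          PySem.List.pyRange_neg_one_eq_nil (by omega)]
      simp
  · rw [if_neg he, if_pos he]
    by_cases h : 0 ≤ PySem.Int.floordiv n 2
    · rw [frame_loop_eq _ h ["C"]]
    · rw [PySem.List.pyRange_one_eq_nil (by omega),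
          PySem.List.pyRange_neg_one_eq_nil (by omega)]
      simp
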